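-- pv_equiv track=rewrite | github.com/maxlamberti/bookie-odds-scraper | egb/utils.py | reformat_list_to_table
-- ===== SOURCE A (Python) =====
-- def reformat_list_to_table(flattened_table, break_token='ROW_BREAK'):
-- 	"""Given a flattened table with row break tokens, reformat into 2d array."""
--
-- 	table, row = [], []
-- 	for token in flattened_table:
-- 		if token == break_token:
-- 			table.append(row)
-- 			row = []
-- 			continue
-- 		row.append(token)
--
-- 	return table
-- ===== SOURCE B (Python) =====
-- def reformat_list_to_table(flattened_table, break_token='ROW_BREAK'):
--     """Given a flattened table with row break tokens, reformat into 2d array."""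
--     seq = list(flattened_table)
--     if break_token not in seq:
--         return []
--     i = seq.index(break_token)
--     return [seq[:i]] + reformat_list_to_table(seq[i + 1:], break_token)
-- ===== Notes on version B (the rewrite author's own statement) =====
-- stated objective: alternative
-- what changed: Replaced the single accumulator loop (table/row state machine) by a recursive index-and-slice decomposition: find the next break token with list.index, emit the slice before it, and recurse on the remainder; the trailing partial row falls away because the base case emits no row.
import Mathlib
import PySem

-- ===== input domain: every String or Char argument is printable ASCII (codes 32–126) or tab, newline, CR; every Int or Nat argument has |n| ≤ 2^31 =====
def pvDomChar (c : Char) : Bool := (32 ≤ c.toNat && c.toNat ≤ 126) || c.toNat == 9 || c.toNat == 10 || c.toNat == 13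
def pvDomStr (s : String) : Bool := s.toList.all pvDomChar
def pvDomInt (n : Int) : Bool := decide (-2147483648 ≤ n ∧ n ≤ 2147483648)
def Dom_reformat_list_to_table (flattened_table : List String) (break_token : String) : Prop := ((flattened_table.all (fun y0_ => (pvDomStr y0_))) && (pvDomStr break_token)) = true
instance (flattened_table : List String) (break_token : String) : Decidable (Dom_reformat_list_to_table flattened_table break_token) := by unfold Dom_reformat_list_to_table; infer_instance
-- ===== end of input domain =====

-- B replaces A's accumulator state machine by a recursive index-and-slice decomposition (objective: alternative).

-- ===== PORT A =====
-- single pass maintaining (table, row); the final partial row is discarded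
def reformat_list_to_table (flattened_table : List String) (break_token : String) : List (List String) :=
  (flattened_table.foldl
    (fun (st : List (List String) × List String) token =>
      if token == break_token then (st.1 ++ [st.2], ([] : List String))
      else (st.1, st.2 ++ [token]))
    ([], [])).1

-- ===== PORT B =====
-- find next break via list.index, slice before it, recurse on the remainder
def reformat_list_to_table_alt (flattened_table : List String) (break_token : String) : List (List String) :=
  match h : PySem.List.index? flattened_table break_token with
  | none => []
  | some i =>
      [PySem.List.slice flattened_table none (some (i : Int))] ++
        reformat_list_to_table_alt (PySem.List.slice flattened_table (some ((i : Int) + 1)) none) break_token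
termination_by flattened_table.length
decreasing_by
  have hmem : break_token ∈ flattened_table := (PySem.List.index?_isSome_iff flattened_table break_token).1 (by rw [h]; rfl)
  have hne : flattened_table ≠ [] := by rintro rfl; simp at hmem
  have hs : PySem.List.slice flattened_table (some ((i : Int) + 1)) none = flattened_table.drop (i + 1) := by
    have : ((i : Int) + 1) = ((i + 1 : Nat) : Int) := by push_cast; ring
    rw [this, PySem.List.slice_from_natCast]
  rw [hs]
  have : 0 < flattened_table.length := List.length_pos_iff.2 hne
  simp [List.length_drop]; omega

-- ===== PRECONDITION & SPEC =====
def Spec_reformat_list_to_table (flattened_table : List String) (break_token : String) (out : List (List String)) : Prop := out = reformat_list_to_table_alt flattened_table break_token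
instance (flattened_table : List String) (break_token : String) (out : List (List String)) : Decidable (Spec_reformat_list_to_table flattened_table break_token out) := by unfold Spec_reformat_list_to_table; infer_instance

-- ===== CLAIM (what is proved, stated in full; the proofs are below) =====
def Claim_equal_reformat_list_to_table : Prop := ∀ (flattened_table : List String) (break_token : String), Dom_reformat_list_to_table flattened_table break_token → Spec_reformat_list_to_table flattened_table break_token (reformat_list_to_table flattened_table break_token)

-- ===== LEMMAS AND PROOFS =====

-- reference splitter: A's loop body as structural recursion on the list with the pending row
def splitGo (bt : String) : List String → List String → List (List String)
  | [], _ => []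
  | t :: ts, row => if t == bt then row :: splitGo bt ts [] else splitGo bt ts (row ++ [t])

theorem foldA_eq_splitGo (bt : String) (xs : List String) :
    ∀ (tbl : List (List String)) (row : List String),
      (xs.foldl
        (fun (st : List (List String) × List String) token =>
          if token == bt then (st.1 ++ [st.2], ([] : List String))
          else (st.1, st.2 ++ [token]))
        (tbl, row)).1 = tbl ++ splitGo bt xs row := by
  induction xs with
  | nil => intro tbl row; simp [splitGo]
  | cons x ts ih =>
      intro tbl row
      by_cases hx : x == bt
      · rw [List.foldl_cons, if_pos hx, ih]
        simp [splitGo, hx]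
      · rw [List.foldl_cons, if_neg hx, ih]
        simp [splitGo, hx]

-- one-step unfolding of B's port, with the slices rewritten to take/drop
theorem alt_unfold (bt : String) (xs : List String) :
    reformat_list_to_table_alt xs bt =
      match PySem.List.index? xs bt with
      | none => []
      | some i => xs.take i :: reformat_list_to_table_alt (xs.drop (i + 1)) bt := by
  rw [reformat_list_to_table_alt]
  cases h : PySem.List.index? xs bt with
  | none => simp
  | some i =>
      have h1 : PySem.List.slice xs none (some (i : Int)) = xs.take i :=
        PySem.List.slice_to_natCast xs i
      have h2 : PySem.List.slice xs (some ((i : Int) + 1)) none = xs.drop (i + 1) := by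
        have : ((i : Int) + 1) = ((i + 1 : Nat) : Int) := by push_cast; ring
        rw [this, PySem.List.slice_from_natCast]
      simp [h1, h2]

theorem splitGo_eq_alt (bt : String) (xs : List String) :
    ∀ row : List String,
      splitGo bt xs row =
        match PySem.List.index? xs bt with
        | none => []
        | some i => (row ++ xs.take i) :: reformat_list_to_table_alt (xs.drop (i + 1)) bt := by
  induction xs with
  | nil =>
      intro row
      simp [splitGo, PySem.List.index?_eq_idxOf?]
  | cons x ts ih =>
      intro row
      by_cases hx : x == bt
      · have hx' : x = bt := by simpa using hx
        have halt : reformat_list_to_table_alt ts bt = splitGo bt ts [] := by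
          rw [alt_unfold, ih]
          cases PySem.List.index? ts bt <;> simp
        rw [hx']
        rw [PySem.List.index?_cons_self]
        simp [splitGo, halt]
      · have hx' : x ≠ bt := by simpa using hx
        rw [PySem.List.index?_cons_of_ne ts hx']
        have hs : splitGo bt (x :: ts) row = splitGo bt ts (row ++ [x]) := by
          simp [splitGo, hx]
        rw [hs, ih]
        cases h : PySem.List.index? ts bt with
        | none => simp
        | some i => simp

-- ===== VERDICT (by name: the statement is the Claim_ definition above) =====
theorem reformat_list_to_table_spec : Claim_equal_reformat_list_to_table := by
  intro xs bt _
  unfold Spec_reformat_list_to_table reformat_list_to_table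
  rw [foldA_eq_splitGo, splitGo_eq_alt, alt_unfold]
  cases PySem.List.index? xs bt <;> simp
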